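-- pv_equiv track=rewrite | github.com/lvalentine6/algorithm_python | programmers/lv3/60062.py | calculate
-- ===== SOURCE A (Python) =====
-- def calculate(n, start, dist, direction, visited):
--     visited = visited[:]
--     visited[start] = True
--
--     if direction == 0:
--         while dist > 0:
--             start += 1
--             dist -= 1
--             if start >= n:
--                 start %= n
--             visited[start] = True
--     else:
--         while dist > 0:
--             start -= 1
--             dist -= 1
--             if start < 0:
--                 start = n + start
--             visited[start] = True
--
--     return visited
-- ===== SOURCE B (Python) =====
-- def calculate(n, start, dist, direction, visited):
--     out = visited[:]
--     out[start] = True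
--     if dist > 0:
--         m = min(dist + 1, n)
--         if direction == 0:
--             end = start + m
--             if end <= n:
--                 out[start:end] = [True] * m
--             else:
--                 out[start:] = [True] * (n - start)
--                 out[:end - n] = [True] * (end - n)
--         else:
--             begin = start - m + 1
--             if begin >= 0:
--                 out[begin:start + 1] = [True] * m
--             else:
--                 out[:start + 1] = [True] * (start + 1)
--                 out[begin + n:] = [True] * (-begin)
--     return out
-- ===== Notes on version B (the rewrite author's own statement) =====
-- stated objective: alternative
-- what changed: B replaces A's step-by-step walk of dist circular positions by a constant number of slice fills of the arc capped at length n.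
-- outside the precondition, e.g. on calculate(2, 1, 2, 0, [False, False, False]): A returns [True, True, False], B returns [True, True]
import Mathlib
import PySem

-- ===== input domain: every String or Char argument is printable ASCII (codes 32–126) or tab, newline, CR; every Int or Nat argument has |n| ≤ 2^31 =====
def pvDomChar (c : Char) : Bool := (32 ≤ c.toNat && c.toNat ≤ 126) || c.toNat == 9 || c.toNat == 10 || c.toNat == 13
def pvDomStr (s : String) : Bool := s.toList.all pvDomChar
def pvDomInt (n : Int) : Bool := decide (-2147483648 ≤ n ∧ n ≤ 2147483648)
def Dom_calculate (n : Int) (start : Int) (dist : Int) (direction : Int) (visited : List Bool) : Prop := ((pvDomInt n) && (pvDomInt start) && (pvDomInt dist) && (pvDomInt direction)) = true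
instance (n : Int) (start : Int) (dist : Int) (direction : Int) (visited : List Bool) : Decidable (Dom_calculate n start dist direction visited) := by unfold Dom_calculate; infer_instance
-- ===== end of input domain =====

-- B replaces A's dist-step walk around the circle by O(1)-many slice fills of the
-- (capped) arc; equivalence is proved on the natural domain (n = len(visited),
-- 0 ≤ start < n) stated in Pre_calculate.

-- ===== PORT A =====
-- while dist > 0: start += 1; dist -= 1; if start >= n: start %= n; visited[start] = True
def calcLoop0 (n : Int) (start : Int) (dist : Int) (visited : List Bool) : List Bool :=
  if h : dist > 0 then
    let start1 := start + 1
    let start2 := if start1 ≥ n then PySem.Int.mod start1 n else start1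
    calcLoop0 n start2 (dist - 1) (PySem.List.pySetD visited start2 true)
  else visited
termination_by dist.toNat
decreasing_by omega

-- while dist > 0: start -= 1; dist -= 1; if start < 0: start = n + start; visited[start] = True
def calcLoop1 (n : Int) (start : Int) (dist : Int) (visited : List Bool) : List Bool :=
  if h : dist > 0 then
    let start1 := start - 1
    let start2 := if start1 < 0 then n + start1 else start1
    calcLoop1 n start2 (dist - 1) (PySem.List.pySetD visited start2 true)
  else visited
termination_by dist.toNat
decreasing_by omega

def calculate (n : Int) (start : Int) (dist : Int) (direction : Int) (visited : List Bool) : List Bool :=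
  let visited := PySem.List.pySetD visited start true
  if direction == 0 then calcLoop0 n start dist visited
  else calcLoop1 n start dist visited

-- ===== PORT B =====
-- Python's out[a:a+m] = [True]*m; exact when 0 ≤ a and a+m ≤ len(out) (all uses below
-- satisfy this under Pre_calculate, where every arc endpoint lies inside the list).
def fillTrue (xs : List Bool) (a : Nat) (m : Nat) : List Bool :=
  xs.take a ++ List.replicate m true ++ xs.drop (a + m)

def calculate_alt (n : Int) (start : Int) (dist : Int) (direction : Int) (visited : List Bool) : List Bool :=
  let out := PySem.List.pySetD visited start true
  if dist > 0 then
    let m := min (dist + 1) n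
    if direction == 0 then
      let e := start + m
      if e ≤ n then fillTrue out start.toNat m.toNat
      else fillTrue (fillTrue out start.toNat (n - start).toNat) 0 (e - n).toNat
    else
      let b := start - m + 1
      if b ≥ 0 then fillTrue out b.toNat m.toNat
      else fillTrue (fillTrue out 0 (start + 1).toNat) (b + n).toNat (-b).toNat
  else out

-- ===== PRECONDITION & SPEC =====
-- Pre_ is the problem's natural domain (n = len(visited), 0 ≤ start < n), plus every
-- dist ≤ 0 input whose single index assignment is in Python range, plus the dist > 0
-- inputs whose whole arc stays strictly inside both the list and [0, n) so that no
-- wraparound and no out-of-range index occurs even when n ≠ len(visited).  It excludes inputs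
-- where A raises (IndexError / ZeroDivisionError) and the remaining accidental cases
-- where a looping A still returns only thanks to Python negative-index wraparound or to
-- a modulus n smaller than the list, which B's slice filling has no reason to reproduce.
def Pre_calculate (n : Int) (start : Int) (dist : Int) (direction : Int) (visited : List Bool) : Prop :=
  ((visited.length : Int) = n ∧ 0 ≤ start ∧ start < n) ∨
  (dist ≤ 0 ∧ -(visited.length : Int) ≤ start ∧ start < (visited.length : Int)) ∨
  (0 < dist ∧ 0 ≤ start ∧ start < (visited.length : Int) ∧
    ((direction = 0 ∧ start + dist + 1 ≤ n ∧ start + dist + 1 ≤ (visited.length : Int)) ∨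
     (direction ≠ 0 ∧ 0 ≤ start - dist ∧ dist + 1 ≤ n)))
instance (n : Int) (start : Int) (dist : Int) (direction : Int) (visited : List Bool) : Decidable (Pre_calculate n start dist direction visited) := by unfold Pre_calculate; infer_instance

def pvWitness_calculate : Int × Int × Int × Int × List Bool := (3, 1, 4, 0, [false, false, false])

def Spec_calculate (n : Int) (start : Int) (dist : Int) (direction : Int) (visited : List Bool) (out : List Bool) : Prop := out = calculate_alt n start dist direction visited
instance (n : Int) (start : Int) (dist : Int) (direction : Int) (visited : List Bool) (out : List Bool) : Decidable (Spec_calculate n start dist direction visited out) := by unfold Spec_calculate; infer_instance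

-- ===== CLAIM (what is proved, stated in full; the proofs are below) =====
def Claim_equal_calculate : Prop := ∀ (n : Int) (start : Int) (dist : Int) (direction : Int) (visited : List Bool), Dom_calculate n start dist direction visited → Pre_calculate n start dist direction visited → Spec_calculate n start dist direction visited (calculate n start dist direction visited)

-- ===== LEMMAS AND PROOFS =====

theorem emod_bounds (x n : Int) (hn : 0 < n) : 0 ≤ x.emod n ∧ x.emod n < n :=
  ⟨Int.emod_nonneg x (by omega), Int.emod_lt_of_pos x hn⟩

theorem emod_cases (x n : Int) (hn : 0 < n) (hlo : -2*n ≤ x) (hhi : x < n) :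
    x.emod n = x ∨ x.emod n = x + n ∨ x.emod n = x + 2*n := by
  by_cases h : 0 ≤ x
  · left; exact Int.emod_eq_of_lt h hhi
  · by_cases h2 : 0 ≤ x + n
    · right; left
      have e : (x + n * 1).emod n = x.emod n := Int.add_mul_emod_self_left x n 1
      have e2 : (x + n).emod n = x + n := Int.emod_eq_of_lt h2 (by omega)
      rw [show x + n * 1 = x + n by ring] at e
      omega
    · right; right
      have e : (x + n * 2).emod n = x.emod n := Int.add_mul_emod_self_left x n 2
      have e2 : (x + n * 2).emod n = x + n * 2 := Int.emod_eq_of_lt (by omega) (by omega)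
      omega

theorem fillTrue_length (xs : List Bool) (a m : Nat) (h : a + m ≤ xs.length) :
    (fillTrue xs a m).length = xs.length := by
  simp [fillTrue]; omega

theorem fillTrue_getElem? (xs : List Bool) (a m i : Nat) (h : a + m ≤ xs.length) :
    (fillTrue xs a m)[i]? = if a ≤ i ∧ i < a + m then some true else xs[i]? := by
  unfold fillTrue
  have hta : (xs.take a).length = a := by simp; omega
  have htb : ((xs.take a) ++ List.replicate m true).length = a + m := by simp; omega
  by_cases h1 : i < a
  · rw [List.getElem?_append_left (by omega), List.getElem?_append_left (by omega)]
    rw [if_neg (by omega)]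
    exact List.getElem?_take_of_lt h1
  · by_cases h2 : i < a + m
    · rw [List.getElem?_append_left (by omega)]
      rw [List.getElem?_append_right (by omega), hta]
      rw [if_pos (by omega)]
      rw [List.getElem?_replicate]
      rw [if_pos (by omega)]
    · rw [List.getElem?_append_right (by omega), htb]
      rw [if_neg (by omega)]
      rw [List.getElem?_drop]
      congr 1
      omega

theorem calcLoop0_getElem? (n : Int) (hn : 0 < n) (k : Nat) :
    ∀ (d s : Int) (acc : List Bool) (i : Nat), d.toNat = k → 0 ≤ s → s < n →
    (acc.length : Int) = n →
    (calcLoop0 n s d acc)[i]? =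
      acc[i]?.map (fun b => b || decide (((i : Int) - s - 1).emod n + 1 ≤ d)) := by
  induction k with
  | zero =>
    intro d s acc i hk hs0 hs1 hlen
    rw [calcLoop0, dif_neg (by omega)]
    have hb := emod_bounds ((i : Int) - s - 1) n hn
    have hnd : ¬ (((i : Int) - s - 1).emod n + 1 ≤ d) := by omega
    simp [hnd]
  | succ k ih =>
    intro d s acc i hk hs0 hs1 hlen
    rw [calcLoop0, dif_pos (by omega)]
    dsimp only
    have hs2 : (if s + 1 ≥ n then PySem.Int.mod (s + 1) n else s + 1)
        = if s + 1 ≥ n then 0 else s + 1 := by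
      by_cases hge : s + 1 ≥ n
      · have hsn : s + 1 = n := by omega
        rw [if_pos hge, if_pos hge, hsn, PySem.Int.mod_eq_emod_of_pos hn, Int.emod_self]
      · rw [if_neg hge, if_neg hge]
    rw [hs2]
    set s2 : Int := if s + 1 ≥ n then 0 else s + 1 with hs2def
    have hs20 : 0 ≤ s2 := by rw [hs2def]; split <;> omega
    have hs21 : s2 < n := by rw [hs2def]; split <;> omega
    rw [PySem.List.pySetD_of_nonneg acc true hs20]
    rw [ih (d - 1) s2 _ i (by omega) hs20 hs21 (by rw [List.length_set]; exact hlen)]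
    by_cases hi : i < acc.length
    · have hgi : acc[i]? = some acc[i] := List.getElem?_eq_getElem hi
      have hbe1 := emod_bounds ((i : Int) - s - 1) n hn
      have hce1 := emod_cases ((i : Int) - s - 1) n hn (by omega) (by omega)
      have hbe2 := emod_bounds ((i : Int) - s2 - 1) n hn
      have hce2 := emod_cases ((i : Int) - s2 - 1) n hn (by omega) (by omega)
      by_cases hieq : s2.toNat = i
      · have hieqz : (i : Int) = s2 := by omega
        rw [hieq] at *
        rw [List.getElem?_set_self (by omega)]
        rw [hgi]
        simp only [Option.map_some]
        congr 1
        have h1 : ((i : Int) - s2 - 1).emod n + 1 ≤ d - 1 ∨ ¬ (((i : Int) - s2 - 1).emod n + 1 ≤ d - 1) := by omega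
        have hP2 : ((i : Int) - s - 1).emod n + 1 ≤ d := by
          rcases hce1 with h | h | h <;> omega
        simp [hP2]
      · rw [List.getElem?_set_ne (by omega)]
        rw [hgi]
        simp only [Option.map_some]
        congr 1
        have hiff : (((i : Int) - s2 - 1).emod n + 1 ≤ d - 1) ↔ (((i : Int) - s - 1).emod n + 1 ≤ d) := by
          constructor <;> intro hh <;>
            [rcases hce1 with h | h | h <;> rcases hce2 with h' | h' | h' <;> omega;
             rcases hce1 with h | h | h <;> rcases hce2 with h' | h' | h' <;> omega]
        cases acc[i] <;> simp [hiff]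
    · have h1 : acc[i]? = none := by rw [List.getElem?_eq_none_iff]; omega
      have h2 : (acc.set s2.toNat true)[i]? = none := by rw [List.getElem?_eq_none_iff]; simp; omega
      rw [h1, h2]
      simp

theorem calcLoop1_getElem? (n : Int) (hn : 0 < n) (k : Nat) :
    ∀ (d s : Int) (acc : List Bool) (i : Nat), d.toNat = k → 0 ≤ s → s < n →
    (acc.length : Int) = n →
    (calcLoop1 n s d acc)[i]? =
      acc[i]?.map (fun b => b || decide ((s - (i : Int) - 1).emod n + 1 ≤ d)) := by
  induction k with
  | zero =>
    intro d s acc i hk hs0 hs1 hlen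
    rw [calcLoop1, dif_neg (by omega)]
    have hb := emod_bounds (s - (i : Int) - 1) n hn
    have hnd : ¬ ((s - (i : Int) - 1).emod n + 1 ≤ d) := by omega
    simp [hnd]
  | succ k ih =>
    intro d s acc i hk hs0 hs1 hlen
    rw [calcLoop1, dif_pos (by omega)]
    dsimp only
    set s2 : Int := if s - 1 < 0 then n + (s - 1) else s - 1 with hs2def
    have hs20 : 0 ≤ s2 := by rw [hs2def]; split <;> omega
    have hs21 : s2 < n := by rw [hs2def]; split <;> omega
    rw [PySem.List.pySetD_of_nonneg acc true hs20]
    rw [ih (d - 1) s2 _ i (by omega) hs20 hs21 (by rw [List.length_set]; exact hlen)]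
    by_cases hi : i < acc.length
    · have hgi : acc[i]? = some acc[i] := List.getElem?_eq_getElem hi
      have hbe1 := emod_bounds (s - (i : Int) - 1) n hn
      have hce1 := emod_cases (s - (i : Int) - 1) n hn (by omega) (by omega)
      have hbe2 := emod_bounds (s2 - (i : Int) - 1) n hn
      have hce2 := emod_cases (s2 - (i : Int) - 1) n hn (by omega) (by omega)
      by_cases hieq : s2.toNat = i
      · have hieqz : (i : Int) = s2 := by omega
        rw [hieq] at *
        rw [List.getElem?_set_self (by omega)]
        rw [hgi]
        simp only [Option.map_some]
        congr 1
        have hP2 : (s - (i : Int) - 1).emod n + 1 ≤ d := by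
          rcases hce1 with h | h | h <;> omega
        simp [hP2]
      · rw [List.getElem?_set_ne (by omega)]
        rw [hgi]
        simp only [Option.map_some]
        congr 1
        have hiff : ((s2 - (i : Int) - 1).emod n + 1 ≤ d - 1) ↔ ((s - (i : Int) - 1).emod n + 1 ≤ d) := by
          constructor <;> intro hh <;>
            [rcases hce1 with h | h | h <;> rcases hce2 with h' | h' | h' <;> omega;
             rcases hce1 with h | h | h <;> rcases hce2 with h' | h' | h' <;> omega]
        cases acc[i] <;> simp [hiff]
    · have h1 : acc[i]? = none := by rw [List.getElem?_eq_none_iff]; omega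
      have h2 : (acc.set s2.toNat true)[i]? = none := by rw [List.getElem?_eq_none_iff]; simp; omega
      rw [h1, h2]
      simp

theorem calcLoop0_nowrap (n : Int) (k : Nat) :
    ∀ (d s : Int) (acc : List Bool) (i : Nat), d.toNat = k → 0 ≤ s → s + d < n →
    (calcLoop0 n s d acc)[i]? =
      acc[i]?.map (fun b => b || decide (s + 1 ≤ (i : Int) ∧ (i : Int) ≤ s + d)) := by
  induction k with
  | zero =>
    intro d s acc i hk hs0 hsd
    rw [calcLoop0, dif_neg (by omega)]
    have hnd : ¬ (s + 1 ≤ (i : Int) ∧ (i : Int) ≤ s + d) := by omega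
    simp only [decide_eq_false hnd, Bool.or_false]
    cases acc[i]? <;> simp
  | succ k ih =>
    intro d s acc i hk hs0 hsd
    rw [calcLoop0, dif_pos (by omega)]
    dsimp only
    rw [if_neg (show ¬ s + 1 ≥ n by omega)]
    rw [PySem.List.pySetD_of_nonneg acc true (show (0:Int) ≤ s + 1 by omega)]
    rw [ih (d - 1) (s + 1) _ i (by omega) (by omega) (by omega)]
    by_cases hi : i < acc.length
    · have hgi : acc[i]? = some acc[i] := List.getElem?_eq_getElem hi
      by_cases hieq : (s + 1).toNat = i
      · have hieqz : (i : Int) = s + 1 := by omega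
        rw [hieq] at *
        rw [List.getElem?_set_self (by omega)]
        rw [hgi]
        simp only [Option.map_some]
        congr 1
        have hP2 : s + 1 ≤ (i : Int) ∧ (i : Int) ≤ s + d := by omega
        simp only [decide_eq_true hP2]
        simp
      · rw [List.getElem?_set_ne (by omega)]
        rw [hgi]
        simp only [Option.map_some]
        congr 1
        have hiff : decide (s + 1 + 1 ≤ (i : Int) ∧ (i : Int) ≤ s + 1 + (d - 1)) =
            decide (s + 1 ≤ (i : Int) ∧ (i : Int) ≤ s + d) :=
          decide_eq_decide.mpr (by constructor <;> intro hh <;> omega)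
        rw [hiff]
    · have h1 : acc[i]? = none := by rw [List.getElem?_eq_none_iff]; omega
      have h2 : (acc.set (s + 1).toNat true)[i]? = none := by
        rw [List.getElem?_eq_none_iff]; simp; omega
      rw [h1, h2]
      simp

theorem calcLoop1_nowrap (n : Int) (k : Nat) :
    ∀ (d s : Int) (acc : List Bool) (i : Nat), d.toNat = k → 0 ≤ s - d →
    (calcLoop1 n s d acc)[i]? =
      acc[i]?.map (fun b => b || decide (s - d ≤ (i : Int) ∧ (i : Int) ≤ s - 1)) := by
  induction k with
  | zero =>
    intro d s acc i hk hsd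
    rw [calcLoop1, dif_neg (by omega)]
    have hnd : ¬ (s - d ≤ (i : Int) ∧ (i : Int) ≤ s - 1) := by omega
    simp only [decide_eq_false hnd, Bool.or_false]
    cases acc[i]? <;> simp
  | succ k ih =>
    intro d s acc i hk hsd
    rw [calcLoop1, dif_pos (by omega)]
    dsimp only
    rw [if_neg (show ¬ s - 1 < 0 by omega)]
    rw [PySem.List.pySetD_of_nonneg acc true (show (0:Int) ≤ s - 1 by omega)]
    rw [ih (d - 1) (s - 1) _ i (by omega) (by omega)]
    by_cases hi : i < acc.length
    · have hgi : acc[i]? = some acc[i] := List.getElem?_eq_getElem hi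
      by_cases hieq : (s - 1).toNat = i
      · have hieqz : (i : Int) = s - 1 := by omega
        rw [hieq] at *
        rw [List.getElem?_set_self (by omega)]
        rw [hgi]
        simp only [Option.map_some]
        congr 1
        have hP2 : s - d ≤ (i : Int) ∧ (i : Int) ≤ s - 1 := by omega
        simp only [decide_eq_true hP2]
        simp
      · rw [List.getElem?_set_ne (by omega)]
        rw [hgi]
        simp only [Option.map_some]
        congr 1
        have hiff : decide (s - 1 - (d - 1) ≤ (i : Int) ∧ (i : Int) ≤ s - 1 - 1) =
            decide (s - d ≤ (i : Int) ∧ (i : Int) ≤ s - 1) :=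
          decide_eq_decide.mpr (by constructor <;> intro hh <;> omega)
        rw [hiff]
    · have h1 : acc[i]? = none := by rw [List.getElem?_eq_none_iff]; omega
      have h2 : (acc.set (s - 1).toNat true)[i]? = none := by
        rw [List.getElem?_eq_none_iff]; simp; omega
      rw [h1, h2]
      simp

-- ===== VERDICT (by name: the statement is the Claim_ definition above) =====
theorem calculate_spec : Claim_equal_calculate := by
  intro n start dist direction visited _hdom hpre
  rcases hpre with ⟨hlen, hst0, hst1⟩ | ⟨hd0, hr0, hr1⟩ | ⟨hd, hst0, hstL, hcase⟩
  case inr.inl =>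
    unfold Spec_calculate calculate calculate_alt
    dsimp only
    rw [calcLoop0, dif_neg (show ¬ dist > 0 by omega), calcLoop1,
        dif_neg (show ¬ dist > 0 by omega), if_neg (show ¬ dist > 0 by omega)]
    split <;> rfl
  case inr.inr =>
    unfold Spec_calculate calculate calculate_alt
    dsimp only
    rw [PySem.List.pySetD_of_nonneg visited true hst0]
    set out := visited.set start.toNat true with hout
    have hlo : out.length = visited.length := by rw [hout, List.length_set]
    have hstt : start.toNat < out.length := by omega
    have houtst : out[start.toNat] = true := by
      rw [List.getElem_eq_iff hstt, hout]
      exact List.getElem?_set_self (by omega)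
    apply List.ext_getElem?
    intro i
    rcases hcase with ⟨hdir, hbound, hboundL⟩ | ⟨hdir, hlow, hdn⟩
    · subst hdir
      have hdt : (((0 : Int) == 0) = true) := by simp
      rw [if_pos hdt, if_pos hdt]
      rw [calcLoop0_nowrap n dist.toNat dist start out i rfl hst0 (by omega)]
      rw [if_pos hd]
      rw [if_pos (show start + min (dist + 1) n ≤ n by omega)]
      rw [fillTrue_getElem? out start.toNat (min (dist + 1) n).toNat i (by omega)]
      by_cases hi : i < out.length
      · have hgi : out[i]? = some out[i] := List.getElem?_eq_getElem hi
        rw [hgi]; simp only [Option.map_some]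
        by_cases hist : i = start.toNat
        · subst hist
          rw [houtst]
          rw [if_pos (by omega)]
          simp
        · have hiff : (start + 1 ≤ (i : Int) ∧ (i : Int) ≤ start + dist) ↔
              (start.toNat ≤ i ∧ i < start.toNat + (min (dist + 1) n).toNat) := by
            constructor <;> intro hh <;> omega
          by_cases hc : start.toNat ≤ i ∧ i < start.toNat + (min (dist + 1) n).toNat
          · rw [if_pos hc]
            rw [decide_eq_true (hiff.mpr hc)]
            simp
          · rw [if_neg hc]
            rw [decide_eq_false (fun hh => hc (hiff.mp hh))]
            simp
      · have hnone : out[i]? = none := by rw [List.getElem?_eq_none_iff]; omega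
        rw [hnone, if_neg (by omega)]
        simp
    · have hdf : ¬ ((direction == 0) = true) := by simpa using hdir
      rw [if_neg hdf, if_neg hdf]
      rw [calcLoop1_nowrap n dist.toNat dist start out i rfl (by omega)]
      rw [if_pos hd]
      rw [if_pos (show start - min (dist + 1) n + 1 ≥ 0 by omega)]
      rw [fillTrue_getElem? out (start - min (dist + 1) n + 1).toNat (min (dist + 1) n).toNat i
            (by omega)]
      by_cases hi : i < out.length
      · have hgi : out[i]? = some out[i] := List.getElem?_eq_getElem hi
        rw [hgi]; simp only [Option.map_some]
        by_cases hist : i = start.toNat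
        · subst hist
          rw [houtst]
          rw [if_pos (by omega)]
          simp
        · have hiff : (start - dist ≤ (i : Int) ∧ (i : Int) ≤ start - 1) ↔
              ((start - min (dist + 1) n + 1).toNat ≤ i ∧
               i < (start - min (dist + 1) n + 1).toNat + (min (dist + 1) n).toNat) := by
            constructor <;> intro hh <;> omega
          by_cases hc : (start - min (dist + 1) n + 1).toNat ≤ i ∧
               i < (start - min (dist + 1) n + 1).toNat + (min (dist + 1) n).toNat
          · rw [if_pos hc]
            rw [decide_eq_true (hiff.mpr hc)]
            simp
          · rw [if_neg hc]
            rw [decide_eq_false (fun hh => hc (hiff.mp hh))]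
            simp
      · have hnone : out[i]? = none := by rw [List.getElem?_eq_none_iff]; omega
        rw [hnone, if_neg (by omega)]
        simp
  have hn : 0 < n := by omega
  unfold Spec_calculate calculate calculate_alt
  dsimp only
  rw [PySem.List.pySetD_of_nonneg visited true hst0]
  set out := visited.set start.toNat true with hout
  have hlo : (out.length : Int) = n := by rw [hout, List.length_set]; exact hlen
  have hstt : start.toNat < out.length := by omega
  have houtst : out[start.toNat] = true := by
    rw [List.getElem_eq_iff hstt, hout]
    exact List.getElem?_set_self (by omega)
  apply List.ext_getElem?
  intro i
  by_cases hdir : direction = 0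
  · subst hdir
    have hdt : (((0 : Int) == 0) = true) := by simp
    rw [if_pos hdt, if_pos hdt]
    rw [calcLoop0_getElem? n hn dist.toNat dist start out i rfl hst0 hst1 hlo]
    by_cases hd : dist > 0
    · rw [if_pos hd]
      by_cases he : start + min (dist + 1) n ≤ n
      · rw [if_pos he]
        rw [fillTrue_getElem? out start.toNat (min (dist + 1) n).toNat i (by omega)]
        by_cases hi : i < out.length
        · have hgi : out[i]? = some out[i] := List.getElem?_eq_getElem hi
          have hbe1 := emod_bounds ((i : Int) - start - 1) n hn
          have hce1 := emod_cases ((i : Int) - start - 1) n hn (by omega) (by omega)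
          rw [hgi]; simp only [Option.map_some]
          by_cases hist : i = start.toNat
          · subst hist
            rw [houtst]
            rw [if_pos (by omega)]
            simp
          · have hiff : (((i : Int) - start - 1).emod n + 1 ≤ dist) ↔
                (start.toNat ≤ i ∧ i < start.toNat + (min (dist + 1) n).toNat) := by
              rcases hce1 with h | h | h <;> constructor <;> intro hh <;> omega
            by_cases hc : start.toNat ≤ i ∧ i < start.toNat + (min (dist + 1) n).toNat
            · rw [if_pos hc]
              have : ((i : Int) - start - 1).emod n + 1 ≤ dist := hiff.mpr hc
              simp [this]
            · rw [if_neg hc]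
              have : ¬ (((i : Int) - start - 1).emod n + 1 ≤ dist) := fun hh => hc (hiff.mp hh)
              simp [this]
        · have hnone : out[i]? = none := by rw [List.getElem?_eq_none_iff]; omega
          rw [hnone, if_neg (by omega)]
          simp
      · rw [if_neg he]
        rw [fillTrue_getElem? _ 0 (start + min (dist + 1) n - n).toNat i
              (by rw [fillTrue_length out _ _ (by omega)]; omega)]
        rw [fillTrue_getElem? out start.toNat (n - start).toNat i (by omega)]
        by_cases hi : i < out.length
        · have hgi : out[i]? = some out[i] := List.getElem?_eq_getElem hi
          have hbe1 := emod_bounds ((i : Int) - start - 1) n hn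
          have hce1 := emod_cases ((i : Int) - start - 1) n hn (by omega) (by omega)
          rw [hgi]; simp only [Option.map_some]
          by_cases hist : i = start.toNat
          · subst hist
            rw [houtst]
            rw [if_neg (by omega), if_pos (by omega)]
            simp
          · have hiff : (((i : Int) - start - 1).emod n + 1 ≤ dist) ↔
                ((0 ≤ i ∧ i < 0 + (start + min (dist + 1) n - n).toNat) ∨
                 (start.toNat ≤ i ∧ i < start.toNat + (n - start).toNat)) := by
              rcases hce1 with h | h | h <;> constructor <;> intro hh <;> omega
            by_cases hc1 : 0 ≤ i ∧ i < 0 + (start + min (dist + 1) n - n).toNat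
            · rw [if_pos hc1]
              have : ((i : Int) - start - 1).emod n + 1 ≤ dist := hiff.mpr (Or.inl hc1)
              simp [this]
            · rw [if_neg hc1]
              by_cases hc2 : start.toNat ≤ i ∧ i < start.toNat + (n - start).toNat
              · rw [if_pos hc2]
                have : ((i : Int) - start - 1).emod n + 1 ≤ dist := hiff.mpr (Or.inr hc2)
                simp [this]
              · rw [if_neg hc2]
                have : ¬ (((i : Int) - start - 1).emod n + 1 ≤ dist) := fun hh => by
                  rcases hiff.mp hh with h | h
                  · exact hc1 h
                  · exact hc2 h
                simp [this]
        · have hnone : out[i]? = none := by rw [List.getElem?_eq_none_iff]; omega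
          rw [hnone, if_neg (by omega), if_neg (by omega)]
          simp
    · rw [if_neg hd]
      have hbe1 := emod_bounds ((i : Int) - start - 1) n hn
      have : ¬ (((i : Int) - start - 1).emod n + 1 ≤ dist) := by omega
      simp [this]
  · have hdf : ¬ ((direction == 0) = true) := by simpa using hdir
    rw [if_neg hdf, if_neg hdf]
    rw [calcLoop1_getElem? n hn dist.toNat dist start out i rfl hst0 hst1 hlo]
    by_cases hd : dist > 0
    · rw [if_pos hd]
      by_cases hb : start - min (dist + 1) n + 1 ≥ 0
      · rw [if_pos hb]
        rw [fillTrue_getElem? out (start - min (dist + 1) n + 1).toNat (min (dist + 1) n).toNat i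
              (by omega)]
        by_cases hi : i < out.length
        · have hgi : out[i]? = some out[i] := List.getElem?_eq_getElem hi
          have hbe1 := emod_bounds (start - (i : Int) - 1) n hn
          have hce1 := emod_cases (start - (i : Int) - 1) n hn (by omega) (by omega)
          rw [hgi]; simp only [Option.map_some]
          by_cases hist : i = start.toNat
          · subst hist
            rw [houtst]
            rw [if_pos (by omega)]
            simp
          · have hiff : ((start - (i : Int) - 1).emod n + 1 ≤ dist) ↔
                ((start - min (dist + 1) n + 1).toNat ≤ i ∧
                 i < (start - min (dist + 1) n + 1).toNat + (min (dist + 1) n).toNat) := by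
              rcases hce1 with h | h | h <;> constructor <;> intro hh <;> omega
            by_cases hc : (start - min (dist + 1) n + 1).toNat ≤ i ∧
                 i < (start - min (dist + 1) n + 1).toNat + (min (dist + 1) n).toNat
            · rw [if_pos hc]
              have : (start - (i : Int) - 1).emod n + 1 ≤ dist := hiff.mpr hc
              simp [this]
            · rw [if_neg hc]
              have : ¬ ((start - (i : Int) - 1).emod n + 1 ≤ dist) := fun hh => hc (hiff.mp hh)
              simp [this]
        · have hnone : out[i]? = none := by rw [List.getElem?_eq_none_iff]; omega
          rw [hnone, if_neg (by omega)]
          simp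
      · rw [if_neg hb]
        rw [fillTrue_getElem? _ (start - min (dist + 1) n + 1 + n).toNat
              (-(start - min (dist + 1) n + 1)).toNat i
              (by rw [fillTrue_length out _ _ (by omega)]; omega)]
        rw [fillTrue_getElem? out 0 (start + 1).toNat i (by omega)]
        by_cases hi : i < out.length
        · have hgi : out[i]? = some out[i] := List.getElem?_eq_getElem hi
          have hbe1 := emod_bounds (start - (i : Int) - 1) n hn
          have hce1 := emod_cases (start - (i : Int) - 1) n hn (by omega) (by omega)
          rw [hgi]; simp only [Option.map_some]
          by_cases hist : i = start.toNat
          · subst hist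
            rw [houtst]
            rw [if_neg (by omega), if_pos (by omega)]
            simp
          · have hiff : ((start - (i : Int) - 1).emod n + 1 ≤ dist) ↔
                (((start - min (dist + 1) n + 1 + n).toNat ≤ i ∧
                  i < (start - min (dist + 1) n + 1 + n).toNat +
                      (-(start - min (dist + 1) n + 1)).toNat) ∨
                 (0 ≤ i ∧ i < 0 + (start + 1).toNat)) := by
              rcases hce1 with h | h | h <;> constructor <;> intro hh <;> omega
            by_cases hc1 : (start - min (dist + 1) n + 1 + n).toNat ≤ i ∧
                  i < (start - min (dist + 1) n + 1 + n).toNat +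
                      (-(start - min (dist + 1) n + 1)).toNat
            · rw [if_pos hc1]
              have : (start - (i : Int) - 1).emod n + 1 ≤ dist := hiff.mpr (Or.inl hc1)
              simp [this]
            · rw [if_neg hc1]
              by_cases hc2 : 0 ≤ i ∧ i < 0 + (start + 1).toNat
              · rw [if_pos hc2]
                have : (start - (i : Int) - 1).emod n + 1 ≤ dist := hiff.mpr (Or.inr hc2)
                simp [this]
              · rw [if_neg hc2]
                have : ¬ ((start - (i : Int) - 1).emod n + 1 ≤ dist) := fun hh => by
                  rcases hiff.mp hh with h | h
                  · exact hc1 h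
                  · exact hc2 h
                simp [this]
        · have hnone : out[i]? = none := by rw [List.getElem?_eq_none_iff]; omega
          rw [hnone, if_neg (by omega), if_neg (by omega)]
          simp
    · rw [if_neg hd]
      have hbe1 := emod_bounds (start - (i : Int) - 1) n hn
      have : ¬ ((start - (i : Int) - 1).emod n + 1 ≤ dist) := by omega
      simp [this]
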